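-- pv_equiv track=rewrite | github.com/devanshibirla20/Port-Scanner | intel.py | detect_os
-- ===== SOURCE A (Python) =====
-- OS_SIGNATURES: list[tuple[set[int], str, str]] = [
--     ({135, 139, 445, 3389}, "Windows (Active Directory/RDP)", "High"),
--     ({135, 445, 3389}, "Windows Server", "High"),
--     ({135, 139, 445}, "Windows (SMB-enabled)", "High"),
--     ({22, 80, 443, 3306}, "Linux LAMP Stack", "Medium"),
--     ({22, 80, 443, 5432}, "Linux (PostgreSQL/nginx)", "Medium"),
--     ({22, 80, 443, 6379}, "Linux (Redis/nginx)", "Medium"),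
--     ({22, 27017}, "Linux (MongoDB Server)", "Medium"),
--     ({22, 9200}, "Linux (Elasticsearch Node)", "Medium"),
--     ({22, 2375}, "Linux (Docker Host — EXPOSED!)", "High"),
--     ({22, 6443}, "Linux (Kubernetes Node)", "High"),
--     ({22, 3306, 80}, "Linux LAMP", "Medium"),
--     ({22, 5432}, "Linux (PostgreSQL)", "Low"),
--     ({22, 25, 110, 143}, "Linux Mail Server (MTA)", "Medium"),
--     ({21, 22, 80, 443}, "Linux Web/FTP Server", "Low"),
--     ({22,}, "Linux/Unix (SSH only)", "Low"),
--     ({23,}, "Network Device (Router/Switch)", "Medium"),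
--     ({21,}, "FTP Server", "Low"),
--     ({1521,}, "Oracle Database Server", "Medium"),
--     ({1433,}, "Windows SQL Server", "Medium"),
-- ]
--
-- def detect_os(open_ports: list[int]) -> tuple[str, str]:
--     """
--     Heuristic OS detection from open port set.
--     Returns (os_guess, confidence).
--     """
--     port_set = set(open_ports)
--     best_match = ("Unknown", "None")
--     best_overlap = 0
--
--     for sig_ports, os_name, confidence in OS_SIGNATURES:
--         overlap = len(sig_ports & port_set)
--         if overlap == len(sig_ports) and overlap > best_overlap:
--             best_overlap = overlap
--             best_match = (os_name, confidence)
--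
--     return best_match
-- ===== SOURCE B (Python) =====
-- # Signature table rewritten as plain port lists, pre-ordered largest-signature-first
-- # (stable: original order kept among equal sizes), so the scan can stop at the first
-- # signature fully contained in the open-port set.
-- _ORDERED_SIGS: list[tuple[list[int], str, str]] = [
--     ([135, 139, 445, 3389], "Windows (Active Directory/RDP)", "High"),
--     ([22, 80, 443, 3306], "Linux LAMP Stack", "Medium"),
--     ([22, 80, 443, 5432], "Linux (PostgreSQL/nginx)", "Medium"),
--     ([22, 80, 443, 6379], "Linux (Redis/nginx)", "Medium"),
--     ([22, 25, 110, 143], "Linux Mail Server (MTA)", "Medium"),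
--     ([21, 22, 80, 443], "Linux Web/FTP Server", "Low"),
--     ([135, 445, 3389], "Windows Server", "High"),
--     ([135, 139, 445], "Windows (SMB-enabled)", "High"),
--     ([22, 3306, 80], "Linux LAMP", "Medium"),
--     ([22, 27017], "Linux (MongoDB Server)", "Medium"),
--     ([22, 9200], "Linux (Elasticsearch Node)", "Medium"),
--     ([22, 2375], "Linux (Docker Host — EXPOSED!)", "High"),
--     ([22, 6443], "Linux (Kubernetes Node)", "High"),
--     ([22, 5432], "Linux (PostgreSQL)", "Low"),
--     ([22], "Linux/Unix (SSH only)", "Low"),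
--     ([23], "Network Device (Router/Switch)", "Medium"),
--     ([21], "FTP Server", "Low"),
--     ([1521], "Oracle Database Server", "Medium"),
--     ([1433], "Windows SQL Server", "Medium"),
-- ]
--
--
-- def detect_os(open_ports: list[int]) -> tuple[str, str]:
--     """
--     Heuristic OS detection from open port set.
--     Returns (os_guess, confidence).
--     """
--     have = set(open_ports)
--     for ports, name, confidence in _ORDERED_SIGS:
--         if all(p in have for p in ports):
--             return (name, confidence)
--     return ("Unknown", "None")
-- ===== Notes on version B (the rewrite author's own statement) =====
-- stated objective: alternative
-- what changed: Replaces A's best-overlap accumulator loop over set-keyed signatures with a hard-coded table of plain port lists pre-ordered by descending signature size (stable), scanned recursively and returning at the first signature whose ports are all open.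
import Mathlib
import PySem

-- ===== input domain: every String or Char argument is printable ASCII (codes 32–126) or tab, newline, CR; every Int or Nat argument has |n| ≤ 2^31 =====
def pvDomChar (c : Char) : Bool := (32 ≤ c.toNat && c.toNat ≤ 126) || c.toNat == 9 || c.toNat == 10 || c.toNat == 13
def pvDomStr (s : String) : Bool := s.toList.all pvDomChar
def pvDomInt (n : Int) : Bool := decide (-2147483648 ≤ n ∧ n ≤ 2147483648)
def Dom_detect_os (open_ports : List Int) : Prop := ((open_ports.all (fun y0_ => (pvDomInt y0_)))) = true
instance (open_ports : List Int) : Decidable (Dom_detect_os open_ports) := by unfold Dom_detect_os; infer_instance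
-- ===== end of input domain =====

-- B replaces A's best-overlap accumulator loop over the set-keyed table by a hard-coded
-- signature table of plain port lists pre-ordered largest-first (stable) and a recursive
-- first-full-match scan that stops early (objective: alternative decomposition).

-- ===== PORT A =====
-- the module constant OS_SIGNATURES used by A
def OS_SIGNATURES : List (PySem.Set Int × String × String) :=
  [(PySem.Set.ofList [135, 139, 445, 3389], "Windows (Active Directory/RDP)", "High"),
   (PySem.Set.ofList [135, 445, 3389], "Windows Server", "High"),
   (PySem.Set.ofList [135, 139, 445], "Windows (SMB-enabled)", "High"),
   (PySem.Set.ofList [22, 80, 443, 3306], "Linux LAMP Stack", "Medium"),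
   (PySem.Set.ofList [22, 80, 443, 5432], "Linux (PostgreSQL/nginx)", "Medium"),
   (PySem.Set.ofList [22, 80, 443, 6379], "Linux (Redis/nginx)", "Medium"),
   (PySem.Set.ofList [22, 27017], "Linux (MongoDB Server)", "Medium"),
   (PySem.Set.ofList [22, 9200], "Linux (Elasticsearch Node)", "Medium"),
   (PySem.Set.ofList [22, 2375], "Linux (Docker Host — EXPOSED!)", "High"),
   (PySem.Set.ofList [22, 6443], "Linux (Kubernetes Node)", "High"),
   (PySem.Set.ofList [22, 3306, 80], "Linux LAMP", "Medium"),
   (PySem.Set.ofList [22, 5432], "Linux (PostgreSQL)", "Low"),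
   (PySem.Set.ofList [22, 25, 110, 143], "Linux Mail Server (MTA)", "Medium"),
   (PySem.Set.ofList [21, 22, 80, 443], "Linux Web/FTP Server", "Low"),
   (PySem.Set.ofList [22], "Linux/Unix (SSH only)", "Low"),
   (PySem.Set.ofList [23], "Network Device (Router/Switch)", "Medium"),
   (PySem.Set.ofList [21], "FTP Server", "Low"),
   (PySem.Set.ofList [1521], "Oracle Database Server", "Medium"),
   (PySem.Set.ofList [1433], "Windows SQL Server", "Medium")]

def detect_os (open_ports : List Int) : String × String :=
  let port_set : PySem.Set Int := PySem.Set.ofList open_ports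
  -- for sig_ports, os_name, confidence in OS_SIGNATURES: … (best_match, best_overlap accumulator)
  (OS_SIGNATURES.foldl
    (fun (st : (String × String) × Int) sig =>
      let overlap : Int := PySem.Set.len (PySem.Set.inter sig.1 port_set)
      if overlap == PySem.Set.len sig.1 && overlap > st.2
      then ((sig.2.1, sig.2.2), overlap)
      else st)
    (("Unknown", "None"), 0)).1

-- ===== PORT B =====
-- B's own constant _ORDERED_SIGS: port lists, pre-ordered by descending size (stable)
def ORDERED_SIGS : List (List Int × String × String) :=
  [([135, 139, 445, 3389], "Windows (Active Directory/RDP)", "High"),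
   ([22, 80, 443, 3306], "Linux LAMP Stack", "Medium"),
   ([22, 80, 443, 5432], "Linux (PostgreSQL/nginx)", "Medium"),
   ([22, 80, 443, 6379], "Linux (Redis/nginx)", "Medium"),
   ([22, 25, 110, 143], "Linux Mail Server (MTA)", "Medium"),
   ([21, 22, 80, 443], "Linux Web/FTP Server", "Low"),
   ([135, 445, 3389], "Windows Server", "High"),
   ([135, 139, 445], "Windows (SMB-enabled)", "High"),
   ([22, 3306, 80], "Linux LAMP", "Medium"),
   ([22, 27017], "Linux (MongoDB Server)", "Medium"),
   ([22, 9200], "Linux (Elasticsearch Node)", "Medium"),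
   ([22, 2375], "Linux (Docker Host — EXPOSED!)", "High"),
   ([22, 6443], "Linux (Kubernetes Node)", "High"),
   ([22, 5432], "Linux (PostgreSQL)", "Low"),
   ([22], "Linux/Unix (SSH only)", "Low"),
   ([23], "Network Device (Router/Switch)", "Medium"),
   ([21], "FTP Server", "Low"),
   ([1521], "Oracle Database Server", "Medium"),
   ([1433], "Windows SQL Server", "Medium")]

-- all(p in have for p in ports)
def matchSig (hv : PySem.Set Int) : List Int → Bool
  | [] => true
  | p :: ps => PySem.Set.contains hv p && matchSig hv ps

-- the for-loop with early return over the ordered table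
def scanSigs (hv : PySem.Set Int) : List (List Int × String × String) → String × String
  | [] => ("Unknown", "None")
  | entry :: rest =>
      if matchSig hv entry.1 then (entry.2.1, entry.2.2) else scanSigs hv rest

def detect_os_alt (open_ports : List Int) : String × String :=
  scanSigs (PySem.Set.ofList open_ports) ORDERED_SIGS

-- ===== PRECONDITION & SPEC =====
def Spec_detect_os (open_ports : List Int) (out : String × String) : Prop := out = detect_os_alt open_ports
instance (open_ports : List Int) (out : String × String) : Decidable (Spec_detect_os open_ports out) := by unfold Spec_detect_os; infer_instance

-- ===== CLAIM (what is proved, stated in full; the proofs are below) =====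
def Claim_equal_detect_os : Prop := ∀ (open_ports : List Int), Dom_detect_os open_ports → Spec_detect_os open_ports (detect_os open_ports)

-- ===== LEMMAS AND PROOFS =====

-- a full overlap is exactly a subset
theorem len_inter_eq_iff (s ps : PySem.Set Int) :
    (PySem.Set.len (PySem.Set.inter s ps) = PySem.Set.len s) ↔ PySem.Set.issubset s ps = true := by
  simp [PySem.Set.len, PySem.Set.inter, PySem.Set.issubset, List.length_filter_eq_length_iff,
    List.all_eq_true]

-- A's loop body, rewritten through len_inter_eq_iff
theorem step_eq (ps : PySem.Set Int) (st : (String × String) × Int)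
    (sig : PySem.Set Int × String × String) :
    (if PySem.Set.len (PySem.Set.inter sig.1 ps) == PySem.Set.len sig.1
        && decide (PySem.Set.len (PySem.Set.inter sig.1 ps) > st.2)
     then ((sig.2.1, sig.2.2), PySem.Set.len (PySem.Set.inter sig.1 ps)) else st)
    = (if PySem.Set.issubset sig.1 ps && decide (st.2 < PySem.Set.len sig.1)
       then ((sig.2.1, sig.2.2), PySem.Set.len sig.1) else st) := by
  by_cases h : PySem.Set.issubset sig.1 ps = true
  · have hlen : PySem.Set.len (PySem.Set.inter sig.1 ps) = PySem.Set.len sig.1 :=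
      (len_inter_eq_iff sig.1 ps).mpr h
    have hnat : (PySem.Set.inter sig.1 ps).length = sig.1.length := by
      simpa [PySem.Set.len] using hlen
    simp [h, hnat]
  · have hnat : (PySem.Set.inter sig.1 ps).length ≠ sig.1.length := by
      intro hc
      exact h ((len_inter_eq_iff sig.1 ps).mp (by simp [PySem.Set.len, hc]))
    simp [h, hnat]

-- where insertBy (descending stable insertion) puts x relative to the first match
theorem find?_insertBy {σ : Type} (k : σ → Int) (p : σ → Bool) (x : σ) (S : List σ)
    (hS : S.Pairwise (fun a b => k b ≤ k a)) :
    (PySem.List.insertBy (fun a b => decide (-(k a) < -(k b))) x S).find? p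
    = if p x then
        (match S.find? p with
         | some m => if k m < k x then some x else some m
         | none => some x)
      else S.find? p := by
  induction S with
  | nil => by_cases hp : p x <;> simp [PySem.List.insertBy, List.find?, hp]
  | cons y ys ih =>
    have hys : ys.Pairwise (fun a b => k b ≤ k a) := hS.tail
    have hy : ∀ m ∈ ys, k m ≤ k y := fun m hm => (List.pairwise_cons.mp hS).1 m hm
    by_cases hins : k y < k x
    · have hlist : PySem.List.insertBy (fun a b => decide (-(k a) < -(k b))) x (y :: ys)
          = x :: y :: ys := by
        simp [PySem.List.insertBy, show -(k x) < -(k y) by omega]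
      rw [hlist]
      by_cases hp : p x
      · rw [List.find?_cons_of_pos hp]
        simp only [hp, if_true]
        cases hfind : List.find? p (y :: ys) with
        | none => rfl
        | some m =>
          have hm := List.mem_of_find?_eq_some hfind
          have hmx : k m < k x := by
            rcases List.mem_cons.mp hm with h1 | h1
            · subst h1; exact hins
            · exact lt_of_le_of_lt (hy m h1) hins
          simp [hmx]
      · rw [List.find?_cons_of_neg hp]
        simp [hp]
    · have hlist : PySem.List.insertBy (fun a b => decide (-(k a) < -(k b))) x (y :: ys)
          = y :: PySem.List.insertBy (fun a b => decide (-(k a) < -(k b))) x ys := by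
        simp [PySem.List.insertBy, show ¬(-(k x) < -(k y)) by omega]
      rw [hlist]
      by_cases hpy : p y
      · rw [List.find?_cons_of_pos hpy, List.find?_cons_of_pos hpy]
        by_cases hp : p x
        · simp [hp, show ¬(k y < k x) from hins]
        · simp [hp]
      · rw [List.find?_cons_of_neg hpy, List.find?_cons_of_neg hpy, ih hys]

-- sorted of a snoc is an insertion into sorted
theorem sorted_snoc {σ : Type} (key : σ → Int) (xs : List σ) (x : σ) :
    PySem.List.sorted (xs ++ [x]) key false
    = PySem.List.insertBy (fun a b => decide (key a < key b)) x (PySem.List.sorted xs key false) := by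
  rw [PySem.List.sorted_eq_foldl_insertBy, PySem.List.sorted_eq_foldl_insertBy, List.foldl_append]
  rfl

-- the sorted list is descending in k
theorem sorted_desc {σ : Type} (k : σ → Int) (xs : List σ) :
    (PySem.List.sorted xs (fun x => -(k x)) false).Pairwise (fun a b => k b ≤ k a) := by
  have := PySem.List.sorted_pairwise xs (fun x => -(k x))
  exact this.imp (by intro a b h; omega)

-- the first-strict-improvement fold over xs equals the first match in the
-- stable descending sort, provided every key is positive.
theorem fold_eq_find {σ β : Type} (p : σ → Bool) (k : σ → Int) (f : σ → β) (d : β)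
    (xs : List σ) (hk : ∀ x ∈ xs, 1 ≤ k x) :
    xs.foldl (fun st x => if p x && decide (st.2 < k x) then (f x, k x) else st) (d, 0)
    = (match (PySem.List.sorted xs (fun x => -(k x)) false).find? p with
       | some m => (f m, k m)
       | none => (d, (0 : Int))) := by
  induction xs using List.reverseRecOn with
  | nil => rfl
  | append_singleton xs x ih =>
    have hk' : ∀ y ∈ xs, 1 ≤ k y := fun y hy => hk y (List.mem_append_left _ hy)
    have hkx : 1 ≤ k x := hk x (List.mem_append_right _ (List.mem_singleton_self x))
    rw [List.foldl_append, ih hk', sorted_snoc (fun x => -(k x)) xs x,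
      find?_insertBy k p x _ (sorted_desc k xs)]
    cases hfind : (PySem.List.sorted xs (fun x => -(k x)) false).find? p with
    | none =>
      by_cases hp : p x <;> simp [List.foldl, hp, show (0 : Int) < k x by omega]
    | some m =>
      by_cases hp : p x
      · by_cases hlt : k m < k x <;> simp [List.foldl, hp, hlt]
      · simp [List.foldl, hp]

-- every signature set in the table is nonempty
theorem sig_len_pos : ∀ sig ∈ OS_SIGNATURES, 1 ≤ PySem.Set.len sig.1 := by decide

-- B's hard-coded table IS the stable descending-size sort of A's table (under ofList)
theorem ordered_eq_sorted :
    PySem.List.sorted OS_SIGNATURES (fun sig => -(PySem.Set.len sig.1)) false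
    = ORDERED_SIGS.map (fun e => (PySem.Set.ofList e.1, e.2)) := by decide

-- B's element-wise membership test is A's subset test
theorem matchSig_eq_issubset (hv : PySem.Set Int) (l : List Int) :
    matchSig hv l = PySem.Set.issubset (PySem.Set.ofList l) hv := by
  have h1 : matchSig hv l = l.all (fun p => PySem.Set.contains hv p) := by
    induction l with
    | nil => rfl
    | cons p ps ih => simp [matchSig, ih]
  rw [h1]
  by_cases h : PySem.Set.issubset (PySem.Set.ofList l) hv = true
  · have := (PySem.Set.issubset_iff _ _).mp h
    rw [h]; simp only [List.all_eq_true]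
    intro p hp
    exact (PySem.Set.contains_iff hv p).mpr (this p (by simp [PySem.Set.mem_ofList, hp]))
  · rw [Bool.not_eq_true] at h; rw [h]
    rw [Bool.eq_false_iff]
    intro hc
    apply absurd _ (Bool.not_eq_true _ ▸ h : ¬ _)
    apply (PySem.Set.issubset_iff _ _).mpr
    intro x hx
    have hxl : x ∈ l := (PySem.Set.mem_ofList _ _).mp hx
    exact (PySem.Set.contains_iff hv x).mp (List.all_eq_true.mp hc x hxl)

-- the recursive scan is a find? over the table
theorem scanSigs_eq_find (hv : PySem.Set Int) (sigs : List (List Int × String × String)) :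
    scanSigs hv sigs
    = (match sigs.find? (fun e => matchSig hv e.1) with
       | some e => (e.2.1, e.2.2)
       | none => ("Unknown", "None")) := by
  induction sigs with
  | nil => rfl
  | cons e rest ih =>
    by_cases h : matchSig hv e.1
    · simp [scanSigs, h, List.find?_cons_of_pos]
    · rw [Bool.not_eq_true] at h
      simp [scanSigs, h, List.find?_cons_of_neg, ih]

-- ===== VERDICT (by name: the statement is the Claim_ definition above) =====
theorem detect_os_spec : Claim_equal_detect_os := by
  intro open_ports _
  unfold Spec_detect_os detect_os detect_os_alt
  simp only []
  rw [List.foldl_ext _ _ _ (fun st sig _ => step_eq (PySem.Set.ofList open_ports) st sig),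
    fold_eq_find (fun sig => PySem.Set.issubset sig.1 (PySem.Set.ofList open_ports))
      (fun sig => PySem.Set.len sig.1) (fun sig => (sig.2.1, sig.2.2)) ("Unknown", "None")
      OS_SIGNATURES sig_len_pos, ordered_eq_sorted,
    scanSigs_eq_find, List.find?_map]
  have hpred : ((fun sig => PySem.Set.issubset sig.1 (PySem.Set.ofList open_ports)) ∘
      (fun e : List Int × String × String => (PySem.Set.ofList e.1, e.2)))
      = fun e => matchSig (PySem.Set.ofList open_ports) e.1 := by
    funext e; simp [Function.comp, matchSig_eq_issubset]
  rw [hpred]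
  cases ORDERED_SIGS.find? (fun e => matchSig (PySem.Set.ofList open_ports) e.1) <;> rfl
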